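-- pv_equiv track=rewrite | github.com/EilonSt/machine-learning | hw2/Union Of Intervals.py | hold_out_error
-- ===== SOURCE A (Python) =====
-- def hold_out_error(hold_out_array, intervals):
--     count = 0
--     for elem in hold_out_array:
--         flag_inside_intervals = False
--         for interval in intervals:
--             if ((interval[0] <= elem[0]) and (elem[0] <= interval[1])):
--                 flag_inside_intervals = True
--         if (flag_inside_intervals):
--             if (elem[1] == 0):
--                 count += 1
--         else:
--             if (elem[1] == 1):
--                 count += 1
--     return count
-- ===== SOURCE B (Python) =====
-- def hold_out_error(hold_out_array, intervals):
--     # Preprocess: drop empty intervals, sort by left end, merge into a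
--     # disjoint union; then test each point against the merged list.
--     merged = []
--     cur = None
--     for l, u in sorted((iv for iv in intervals if iv[0] <= iv[1]), key=lambda iv: iv[0]):
--         if cur is None:
--             cur = (l, u)
--         elif l <= cur[1]:
--             if u > cur[1]:
--                 cur = (cur[0], u)
--         else:
--             merged.append(cur)
--             cur = (l, u)
--     if cur is not None:
--         merged.append(cur)
--     count = 0
--     for x, y in hold_out_array:
--         inside = any(a <= x <= b for a, b in merged)
--         if y == (0 if inside else 1):
--             count += 1
--     return count
-- ===== Notes on version B (the rewrite author's own statement) =====
-- stated objective: faster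
-- what changed: B preprocesses the intervals once (drops empty ones, sorts by left endpoint, merges overlaps into a disjoint union) and then tests each point against the merged list with an early-exit any(), instead of A's full nested scan with a flag.
import Mathlib
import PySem

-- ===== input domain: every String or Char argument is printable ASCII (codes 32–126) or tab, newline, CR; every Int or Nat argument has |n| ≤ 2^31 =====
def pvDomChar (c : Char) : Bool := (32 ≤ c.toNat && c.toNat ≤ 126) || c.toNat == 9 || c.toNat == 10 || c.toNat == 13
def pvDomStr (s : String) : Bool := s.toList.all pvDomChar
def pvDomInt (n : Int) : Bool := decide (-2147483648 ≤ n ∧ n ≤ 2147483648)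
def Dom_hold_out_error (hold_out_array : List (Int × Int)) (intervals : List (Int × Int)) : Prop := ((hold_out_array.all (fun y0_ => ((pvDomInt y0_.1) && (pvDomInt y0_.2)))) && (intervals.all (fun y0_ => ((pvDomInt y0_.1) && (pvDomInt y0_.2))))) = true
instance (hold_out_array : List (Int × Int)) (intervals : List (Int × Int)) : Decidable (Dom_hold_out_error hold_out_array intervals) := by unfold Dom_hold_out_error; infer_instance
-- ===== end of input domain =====

-- B preprocesses the intervals once (drop empty, sort by left end, merge overlaps)
-- and then tests each point against the merged disjoint list with an early-exit any.

-- ===== PORT A =====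
def hold_out_error (hold_out_array : List (Int × Int)) (intervals : List (Int × Int)) : Int :=
  hold_out_array.foldl (fun count elem =>
    let flag_inside_intervals :=
      intervals.foldl (fun f interval =>
        if interval.1 ≤ elem.1 ∧ elem.1 ≤ interval.2 then true else f) false
    if flag_inside_intervals then
      (if elem.2 = 0 then count + 1 else count)
    else
      (if elem.2 = 1 then count + 1 else count)) 0

-- ===== PORT B =====
-- one step of B's merging loop: state = (merged so far, current open interval)
def pvMergeStep (st : List (Int × Int) × Option (Int × Int)) (p : Int × Int) :
    List (Int × Int) × Option (Int × Int) :=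
  match st.2 with
  | none => (st.1, some p)
  | some c =>
    if p.1 ≤ c.2 then
      (if p.2 > c.2 then (st.1, some (c.1, p.2)) else (st.1, some c))
    else (st.1 ++ [c], some p)

-- the trailing 'if cur is not None: merged.append(cur)'
def pvFlush (st : List (Int × Int) × Option (Int × Int)) : List (Int × Int) :=
  match st.2 with
  | none => st.1
  | some c => st.1 ++ [c]

-- 'any(a <= x <= b for a, b in ivs)'
def pvCovered (x : Int) (ivs : List (Int × Int)) : Bool :=
  ivs.any (fun p => decide (p.1 ≤ x) && decide (x ≤ p.2))

def hold_out_error_alt (hold_out_array : List (Int × Int)) (intervals : List (Int × Int)) : Int :=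
  let merged := pvFlush
    ((PySem.List.sorted (intervals.filter (fun iv => decide (iv.1 ≤ iv.2))) (fun iv => iv.1) false).foldl
      pvMergeStep ([], none))
  hold_out_array.foldl (fun count e =>
    let inside := pvCovered e.1 merged
    if e.2 = (if inside then 0 else 1) then count + 1 else count) 0

-- ===== PRECONDITION & SPEC =====
def Spec_hold_out_error (hold_out_array : List (Int × Int)) (intervals : List (Int × Int)) (out : Int) : Prop := out = hold_out_error_alt hold_out_array intervals
instance (hold_out_array : List (Int × Int)) (intervals : List (Int × Int)) (out : Int) : Decidable (Spec_hold_out_error hold_out_array intervals out) := by unfold Spec_hold_out_error; infer_instance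

-- ===== CLAIM (what is proved, stated in full; the proofs are below) =====
def Claim_equal_hold_out_error : Prop := ∀ (hold_out_array : List (Int × Int)) (intervals : List (Int × Int)), Dom_hold_out_error hold_out_array intervals → Spec_hold_out_error hold_out_array intervals (hold_out_error hold_out_array intervals)

-- ===== LEMMAS AND PROOFS =====

-- A's inner flag loop computes 'b || covered'
theorem flag_eq_covered (x : Int) (ivs : List (Int × Int)) (b : Bool) :
    ivs.foldl (fun f interval =>
      if interval.1 ≤ x ∧ x ≤ interval.2 then true else f) b
      = (b || pvCovered x ivs) := by
  induction ivs generalizing b with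
  | nil => simp [pvCovered]
  | cons p t ih =>
    simp only [List.foldl_cons]
    rw [ih]
    by_cases h : p.1 ≤ x ∧ x ≤ p.2
    · simp [pvCovered, h.1, h.2]
    · rw [if_neg h]
      rw [not_and_or] at h
      rcases h with h | h <;> simp [pvCovered, h]

theorem covered_append (x : Int) (l₁ l₂ : List (Int × Int)) :
    pvCovered x (l₁ ++ l₂) = (pvCovered x l₁ || pvCovered x l₂) := by
  simp [pvCovered]

theorem covered_cons (x : Int) (p : Int × Int) (t : List (Int × Int)) :
    pvCovered x (p :: t) = (pvCovered x [p] || pvCovered x t) := by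
  simp [pvCovered]

-- coverage of a list depends only on its members
theorem covered_eq_of_mem_iff (x : Int) (l₁ l₂ : List (Int × Int))
    (h : ∀ p, p ∈ l₁ ↔ p ∈ l₂) : pvCovered x l₁ = pvCovered x l₂ := by
  unfold pvCovered
  rw [Bool.eq_iff_iff]
  simp only [List.any_eq_true]
  constructor
  · rintro ⟨p, hp, hc⟩; exact ⟨p, (h p).mp hp, hc⟩
  · rintro ⟨p, hp, hc⟩; exact ⟨p, (h p).mpr hp, hc⟩

-- the main merging invariant: if every later left end is ≥ the open interval's
-- left end and the remaining list is sorted by left end, the fold preserves coverage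
theorem merge_covered (x : Int) (l : List (Int × Int)) :
    ∀ (m : List (Int × Int)) (c : Option (Int × Int)),
    (∀ cc, c = some cc → ∀ q ∈ l, cc.1 ≤ q.1) →
    l.Pairwise (fun a b => a.1 ≤ b.1) →
    pvCovered x (pvFlush (l.foldl pvMergeStep (m, c)))
      = (pvCovered x (pvFlush (m, c)) || pvCovered x l) := by
  induction l with
  | nil => intro m c _ _; simp [pvCovered]
  | cons p t ih =>
    intro m c hc hpw
    rw [List.pairwise_cons] at hpw
    simp only [List.foldl_cons]
    cases c with
    | none =>
      show pvCovered x (pvFlush (t.foldl pvMergeStep (m, some p))) = _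
      rw [ih m (some p)
        (by intro cc hcc q hq; rw [Option.some.injEq] at hcc; subst hcc; exact hpw.1 q hq)
        hpw.2]
      simp [pvFlush, pvCovered, Bool.or_assoc]
    | some cc =>
      have hccp : cc.1 ≤ p.1 := hc cc rfl p (by simp)
      have hct : ∀ q ∈ t, cc.1 ≤ q.1 := fun q hq => hc cc rfl q (by simp [hq])
      show pvCovered x (pvFlush (t.foldl pvMergeStep (pvMergeStep (m, some cc) p))) = _
      simp only [pvMergeStep]
      by_cases h1 : p.1 ≤ cc.2
      · by_cases h2 : p.2 > cc.2
        · rw [if_pos h1, if_pos h2]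
          rw [ih m (some (cc.1, p.2))
            (by intro c2 hc2 q hq; rw [Option.some.injEq] at hc2; subst hc2; exact hct q hq)
            hpw.2]
          have hsplit : pvCovered x [(cc.1, p.2)] = (pvCovered x [cc] || pvCovered x [p]) := by
            rw [Bool.eq_iff_iff]
            simp only [pvCovered, List.any_cons, List.any_nil, Bool.or_false, Bool.or_eq_true,
              Bool.and_eq_true, decide_eq_true_eq]
            omega
          simp only [pvFlush, covered_append, hsplit, covered_cons x p t]
          simp [Bool.or_assoc, Bool.or_comm, Bool.or_left_comm]
        · rw [if_pos h1, if_neg h2]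
          rw [ih m (some cc)
            (by intro c2 hc2 q hq; rw [Option.some.injEq] at hc2; subst hc2; exact hct q hq)
            hpw.2]
          have hPC : pvCovered x [p] = true → pvCovered x [cc] = true := by
            simp only [pvCovered, List.any_cons, List.any_nil, Bool.or_false,
              Bool.and_eq_true, decide_eq_true_eq]
            omega
          rw [covered_cons x p t]
          cases hp' : pvCovered x [p] with
          | false => simp [pvFlush, covered_append]
          | true =>
            simp [pvFlush, covered_append, hPC hp']
      · rw [if_neg h1]
        rw [ih (m ++ [cc]) (some p)
          (by intro c2 hc2 q hq; rw [Option.some.injEq] at hc2; subst hc2; exact hpw.1 q hq)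
          hpw.2]
        rw [covered_cons x p t]
        simp only [pvFlush, covered_append]
        rw [Bool.or_assoc]

-- the merged list covers exactly what the original intervals cover
theorem merged_covered (x : Int) (intervals : List (Int × Int)) :
    pvCovered x (pvFlush
      ((PySem.List.sorted (intervals.filter (fun iv => decide (iv.1 ≤ iv.2))) (fun iv => iv.1) false).foldl
        pvMergeStep ([], none)))
      = pvCovered x intervals := by
  set s := PySem.List.sorted (intervals.filter (fun iv => decide (iv.1 ≤ iv.2))) (fun iv => iv.1) false with hs
  rw [merge_covered x s [] none (fun cc h => nomatch h) (PySem.List.sorted_pairwise _ _)]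
  have hmem : ∀ p, p ∈ s ↔ p ∈ intervals.filter (fun iv => decide (iv.1 ≤ iv.2)) := by
    intro p; rw [hs, PySem.List.mem_sorted]
  rw [show pvCovered x (pvFlush ([], none)) = false by simp [pvFlush, pvCovered],
    Bool.false_or, covered_eq_of_mem_iff x s _ hmem]
  -- dropping empty intervals does not change coverage
  unfold pvCovered
  rw [Bool.eq_iff_iff]
  simp only [List.any_eq_true, List.mem_filter, decide_eq_true_eq, Bool.and_eq_true]
  constructor
  · rintro ⟨p, ⟨hp, _⟩, hc⟩; exact ⟨p, hp, hc⟩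
  · rintro ⟨p, hp, hc⟩
    refine ⟨p, ⟨hp, ?_⟩, hc⟩
    omega

-- ===== VERDICT (by name: the statement is the Claim_ definition above) =====
theorem hold_out_error_spec : Claim_equal_hold_out_error := by
  intro ha ivs _
  show hold_out_error ha ivs = hold_out_error_alt ha ivs
  unfold hold_out_error hold_out_error_alt
  congr 1
  funext count e
  simp only [flag_eq_covered, Bool.false_or, merged_covered]
  cases h : pvCovered e.1 ivs <;> simp [h]
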